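-- pv_equiv track=rewrite | github.com/zjuzwl/IOT_BOSCH | final_one.py | first_seconday_sort
-- ===== SOURCE A (Python) =====
-- def first_seconday_sort(array):
--     # 最小值是min_value；次小值是min_value2，下面的语句是对于min_value两个进行初始化
--     if array[0]>array[1]:
--         min_value2 = array[0]
--         min_value = array[1]
--     else:
--         min_value = array[0]
--         min_value2 = array[1]
--     # 对于整个给定的一列或者一行数组进行遍历，
--     for i in range(2, len(array)-3):
--         if array[i]<=min_value:
--             min_value2 = min_value
--             min_value = array[i]
--         elif array[i]<=min_value2:
--             min_value2 = array[i]
--     return min_value2-min_value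
-- ===== SOURCE B (Python) =====
-- def first_seconday_sort(array):
--     sub = array[:max(2, len(array) - 3)]
--     s = sorted(sub)
--     return s[1] - s[0]
-- ===== Notes on version B (the rewrite author's own statement) =====
-- stated objective: simpler
-- what changed: Replaces A's single-pass two-minimum tracking loop (with its initialisation from the first two elements) by slicing the considered prefix array[:max(2, len(array)-3)] once, sorting it, and returning s[1]-s[0].
-- outside the precondition, e.g. on first_seconday_sort([1]): A raises IndexError, B raises IndexError; on first_seconday_sort([0]): A raises IndexError, B raises IndexError
import Mathlib
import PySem

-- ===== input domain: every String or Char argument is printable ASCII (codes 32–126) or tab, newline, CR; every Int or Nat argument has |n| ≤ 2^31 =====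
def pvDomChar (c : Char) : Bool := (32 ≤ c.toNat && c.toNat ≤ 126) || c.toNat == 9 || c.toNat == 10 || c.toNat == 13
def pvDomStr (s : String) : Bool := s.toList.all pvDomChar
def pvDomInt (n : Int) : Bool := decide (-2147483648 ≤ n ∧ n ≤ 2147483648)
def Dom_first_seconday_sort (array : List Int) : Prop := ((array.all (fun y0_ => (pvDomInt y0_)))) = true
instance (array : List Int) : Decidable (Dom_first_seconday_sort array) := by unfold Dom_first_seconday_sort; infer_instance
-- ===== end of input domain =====

-- B replaces A's single-pass two-minimum tracking loop by slicing the considered prefix once and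
-- sorting it, returning sorted(sub)[1] - sorted(sub)[0] (objective: simpler).

-- ===== PORT A =====
-- loop body of A: the if/elif updating (min_value, min_value2)
def pvStep (p : Int × Int) (x : Int) : Int × Int :=
  if x ≤ p.1 then (x, p.1) else if x ≤ p.2 then (p.1, x) else p

def first_seconday_sort (array : List Int) : Int :=
  let init : Int × Int :=
    if PySem.List.pyGetD array 0 0 > PySem.List.pyGetD array 1 0 then
      (PySem.List.pyGetD array 1 0, PySem.List.pyGetD array 0 0)
    else
      (PySem.List.pyGetD array 0 0, PySem.List.pyGetD array 1 0)
  let res := (PySem.List.pyRange 2 (PySem.List.len array - 3) 1).foldl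
      (fun p i => pvStep p (PySem.List.pyGetD array i 0)) init
  res.2 - res.1

-- ===== PORT B =====
def first_seconday_sort_alt (array : List Int) : Int :=
  let sub := PySem.List.slice array none (some (max 2 (PySem.List.len array - 3)))
  let s := PySem.List.sorted sub (fun x => x)
  PySem.List.pyGetD s 1 0 - PySem.List.pyGetD s 0 0

-- ===== PRECONDITION & SPEC =====
-- A raises IndexError on lists of fewer than two elements (array[1]); those are excluded.
def Pre_first_seconday_sort (array : List Int) : Prop := 2 ≤ array.length
instance (array : List Int) : Decidable (Pre_first_seconday_sort array) := by unfold Pre_first_seconday_sort; infer_instance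
def pvWitness_first_seconday_sort : List Int := [3, 1, 4, 1, 5, 9, 2]

def Spec_first_seconday_sort (array : List Int) (out : Int) : Prop := out = first_seconday_sort_alt array
instance (array : List Int) (out : Int) : Decidable (Spec_first_seconday_sort array out) := by unfold Spec_first_seconday_sort; infer_instance

-- ===== CLAIM (what is proved, stated in full; the proofs are below) =====
def Claim_equal_first_seconday_sort : Prop := ∀ (array : List Int), Dom_first_seconday_sort array → Pre_first_seconday_sort array → Spec_first_seconday_sort array (first_seconday_sort array)

-- ===== LEMMAS AND PROOFS =====

-- one insertion into a sorted list whose first two elements are the pair tracked by A's loop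
lemma pvInsert_step (x p1 p2 : Int) (rest : List Int) (h : p1 ≤ p2) :
    ∃ rest2, PySem.List.insertBy (fun a b => decide (a < b)) x (p1 :: p2 :: rest)
        = (pvStep (p1, p2) x).1 :: (pvStep (p1, p2) x).2 :: rest2
      ∧ (pvStep (p1, p2) x).1 ≤ (pvStep (p1, p2) x).2 := by
  unfold pvStep
  by_cases h1 : x < p1
  · refine ⟨p2 :: rest, ?_, ?_⟩ <;> simp [PySem.List.insertBy, h1, le_of_lt h1]
  · by_cases h2 : x < p2
    · refine ⟨p2 :: rest, ?_, ?_⟩ <;>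
        simp only [PySem.List.insertBy, h1, h2, decide_false] <;>
        split_ifs <;> simp_all <;> omega
    · refine ⟨PySem.List.insertBy (fun a b => decide (a < b)) x rest, ?_, ?_⟩ <;>
        simp only [PySem.List.insertBy, h1, h2, decide_false] <;>
        split_ifs <;> simp_all <;> omega

-- A's loop fold computes exactly the first two elements of B's insertion-sort fold
lemma pvFold_sorted (l : List Int) : ∀ (p1 p2 : Int) (rest : List Int), p1 ≤ p2 →
    ∃ rest', l.foldl (fun acc x => PySem.List.insertBy (fun a b => decide (a < b)) x acc) (p1 :: p2 :: rest)
        = (l.foldl pvStep (p1, p2)).1 :: (l.foldl pvStep (p1, p2)).2 :: rest'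
      ∧ (l.foldl pvStep (p1, p2)).1 ≤ (l.foldl pvStep (p1, p2)).2 := by
  induction l with
  | nil => intro p1 p2 rest h; exact ⟨rest, rfl, h⟩
  | cons x t ih =>
    intro p1 p2 rest h
    obtain ⟨rest2, heq, hle⟩ := pvInsert_step x p1 p2 rest h
    simp only [List.foldl_cons, heq]
    exact ih (pvStep (p1, p2) x).1 (pvStep (p1, p2) x).2 rest2 hle

-- A's index loop over range(2, len-3) is a fold over the corresponding sublist
lemma pv_foldl_range (xs : List Int) (n : Nat) : ∀ (a : Int) (init : Int × Int), 0 ≤ a → a.toNat + n ≤ xs.length →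
    (PySem.List.pyRange a (a + n) 1).foldl (fun p i => pvStep p (PySem.List.pyGetD xs i 0)) init
      = ((xs.drop a.toNat).take n).foldl pvStep init := by
  induction n with
  | zero =>
    intro a init ha hb
    rw [PySem.List.pyRange_one_eq_nil (by omega)]
    simp
  | succ n ih =>
    intro a init ha hb
    have hlt : a.toNat < xs.length := by omega
    rw [PySem.List.pyRange_one_cons (by omega)]
    have hdrop : xs.drop a.toNat = xs[a.toNat] :: xs.drop (a.toNat + 1) :=
      (List.getElem_cons_drop hlt).symm
    rw [hdrop]
    simp only [List.take_succ_cons, List.foldl_cons]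
    have hget : PySem.List.pyGetD xs a 0 = xs[a.toNat] :=
      PySem.List.pyGetD_eq_getElem xs 0 ha (by omega)
    have hrange : a + (↑n + 1) = (a + 1) + ↑n := by ring
    rw [hget]
    push_cast
    rw [hrange]
    have hih := ih (a + 1) (pvStep init xs[a.toNat]) (by omega) (by omega)
    have ht : (a + 1).toNat = a.toNat + 1 := by omega
    rw [ht] at hih
    exact hih

-- ===== VERDICT (by name: the statement is the Claim_ definition above) =====
theorem first_seconday_sort_spec : Claim_equal_first_seconday_sort := by
  intro array _ hpre
  unfold Pre_first_seconday_sort at hpre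
  unfold Spec_first_seconday_sort
  rcases array with _ | ⟨a, _ | ⟨b, t⟩⟩
  · simp at hpre
  · simp at hpre
  · unfold first_seconday_sort first_seconday_sort_alt
    simp only [PySem.List.len_eq, PySem.List.pyGetD_zero_cons]
    have h1 : PySem.List.pyGetD (a :: b :: t) 1 0 = b := by simp [pysem]
    rw [h1]
    set init : Int × Int := if a > b then (b, a) else (a, b) with hinit
    have hinit_le : init.1 ≤ init.2 := by rw [hinit]; split_ifs <;> simp <;> omega
    -- the sliced prefix is a :: b :: mid
    set mid : List Int := t.take ((max 2 ((((a :: b :: t).length : Int)) - 3)).toNat - 2) with hmid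
    have hlen : ((a :: b :: t).length : Int) = (t.length : Int) + 2 := by simp; omega
    have hsub : PySem.List.slice (a :: b :: t) none (some (max 2 (((a :: b :: t).length : Int) - 3)))
        = a :: b :: mid := by
      rw [PySem.List.slice_to (a :: b :: t) (by omega)]
      have h2 : 2 ≤ (max 2 (((a :: b :: t).length : Int) - 3)).toNat := by omega
      rw [hmid]
      rcases Nat.exists_eq_add_of_le h2 with ⟨k, hk⟩
      rw [hk]
      have he1 : 2 + k - 2 = k := by omega
      have he2 : 2 + k = k + 1 + 1 := by omega
      rw [he1, he2]
      simp [List.take_succ_cons]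
    -- A's loop equals the fold of pvStep over mid
    have hloop : (PySem.List.pyRange 2 (((a :: b :: t).length : Int) - 3) 1).foldl
        (fun p i => pvStep p (PySem.List.pyGetD (a :: b :: t) i 0)) init
        = mid.foldl pvStep init := by
      by_cases hbig : 3 ≤ t.length
      · have hn : (((a :: b :: t).length : Int)) - 3 = 2 + ((t.length - 3 : Nat) : Int) := by
          simp; omega
        rw [hn, pv_foldl_range (a :: b :: t) (t.length - 3) 2 init (by omega) (by simp; omega)]
        have hmid' : mid = t.take (t.length - 3) := by
          rw [hmid]; congr 1; simp; omega
        rw [hmid']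
        rfl
      · rw [PySem.List.pyRange_one_eq_nil (by simp; omega)]
        have hmid' : mid = [] := by
          rw [hmid]
          have : (max 2 (((a :: b :: t).length : Int) - 3)).toNat - 2 = 0 := by simp; omega
          rw [this]; rfl
        rw [hmid']
        simp
    rw [hsub, hloop]
    -- B's sort is an insertion fold whose first two elements track A's pair
    rw [PySem.List.sorted_eq_foldl_insertBy (a :: b :: mid) (fun x => x)]
    simp only [List.foldl_cons]
    have hfirst : PySem.List.insertBy (fun a b => decide (a < b)) b
        (PySem.List.insertBy (fun a b => decide (a < b)) a []) = [init.1, init.2] := by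
      rw [hinit]
      simp only [PySem.List.insertBy]
      split_ifs <;> simp_all
    rw [hfirst]
    obtain ⟨rest', heq, hle⟩ := pvFold_sorted mid init.1 init.2 [] hinit_le
    rw [heq]
    have hg0 : PySem.List.pyGetD ((mid.foldl pvStep (init.1, init.2)).1 :: (mid.foldl pvStep (init.1, init.2)).2 :: rest') 0 0
        = (mid.foldl pvStep (init.1, init.2)).1 := PySem.List.pyGetD_zero_cons _ _ _
    have hg1 : PySem.List.pyGetD ((mid.foldl pvStep (init.1, init.2)).1 :: (mid.foldl pvStep (init.1, init.2)).2 :: rest') 1 0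
        = (mid.foldl pvStep (init.1, init.2)).2 := by simp [pysem]
    rw [hg0, hg1]
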